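-- pv_equiv track=rewrite | github.com/Ameer-Moustafa/foundations-cs-python | assignment_2/assignment_2.py | checkCharacter
-- ===== SOURCE A (Python) =====
-- def checkCharacter(s1, s2):
--     checked_string_1 = ""
--     checked_string_2 = ""
--     for i in range(len(s1)):
--         checked_string_1+= s1[i]
--         for j in range(len(s2)):
--             if(s1[i] == s2[j]):
--                 checked_string_2 += s2[j]
--     if(checked_string_1 == checked_string_2):
--         return True
--     else:
--         return False
-- ===== SOURCE B (Python) =====
-- def checkCharacter(s1, s2):
--     freq = {}
--     for ch in s2:
--         freq[ch] = freq.get(ch, 0) + 1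
--     return all(freq.get(ch, 0) == 1 for ch in s1)
-- ===== Notes on version B (the rewrite author's own statement) =====
-- stated objective: faster
-- what changed: A reconstructs two strings (copying s1 and, per s1 char, scanning all of s2 appending matches) and compares them; B builds a frequency table of s2 in one pass and returns whether every character of s1 occurs exactly once in s2 - no string building or final comparison.
import Mathlib
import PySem

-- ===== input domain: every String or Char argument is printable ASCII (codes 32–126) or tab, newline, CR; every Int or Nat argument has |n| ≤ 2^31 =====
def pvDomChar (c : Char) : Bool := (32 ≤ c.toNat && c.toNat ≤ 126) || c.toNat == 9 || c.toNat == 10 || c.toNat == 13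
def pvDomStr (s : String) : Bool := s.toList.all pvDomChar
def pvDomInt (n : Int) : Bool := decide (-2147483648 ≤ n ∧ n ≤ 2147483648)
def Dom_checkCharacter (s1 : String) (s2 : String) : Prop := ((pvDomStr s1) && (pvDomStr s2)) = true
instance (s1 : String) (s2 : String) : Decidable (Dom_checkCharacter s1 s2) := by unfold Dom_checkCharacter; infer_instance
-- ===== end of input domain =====

-- B replaces A's reconstruct-two-strings-and-compare (a scan of s2 per s1 character) with a
-- one-pass frequency table of s2 and a direct "every s1 char occurs exactly once in s2" check.

-- ===== PORT A =====
-- for i in range(len(s1)): checked_string_1 += s1[i]; for j in range(len(s2)): if s1[i]==s2[j]: checked_string_2 += s2[j]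
def checkCharacter (s1 : String) (s2 : String) : Bool :=
  let p := s1.toList.foldl
    (fun (st : List Char × List Char) c =>
      (st.1 ++ [c],
       s2.toList.foldl (fun acc d => if c = d then acc ++ [d] else acc) st.2))
    ([], [])
  if p.1 = p.2 then true else false

-- ===== PORT B =====
def checkCharacter_alt (s1 : String) (s2 : String) : Bool :=
  let freq : PySem.Dict Char Int :=
    s2.toList.foldl (fun d ch => d.insert ch (d.getD ch 0 + 1)) PySem.Dict.empty
  s1.toList.all (fun ch => freq.getD ch 0 == 1)

-- ===== PRECONDITION & SPEC =====
def Spec_checkCharacter (s1 : String) (s2 : String) (out : Bool) : Prop := out = checkCharacter_alt s1 s2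
instance (s1 : String) (s2 : String) (out : Bool) : Decidable (Spec_checkCharacter s1 s2 out) := by unfold Spec_checkCharacter; infer_instance

-- ===== CLAIM (what is proved, stated in full; the proofs are below) =====
def Claim_equal_checkCharacter : Prop := ∀ (s1 : String) (s2 : String), Dom_checkCharacter s1 s2 → Spec_checkCharacter s1 s2 (checkCharacter s1 s2)

-- ===== LEMMAS AND PROOFS =====

-- A's inner loop over s2 appends one copy of c per occurrence of c in l2
theorem pvInner (c : Char) : ∀ (l2 acc : List Char),
    l2.foldl (fun acc d => if c = d then acc ++ [d] else acc) acc
    = acc ++ List.replicate (l2.count c) c := by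
  intro l2
  induction l2 with
  | nil => intro acc; simp
  | cons d t ih =>
      intro acc
      rw [List.foldl_cons]
      by_cases h : c = d
      · subst h
        rw [if_pos rfl, ih]
        have : (c :: t).count c = t.count c + 1 := by simp
        rw [this, List.replicate_succ]
        simp
      · rw [if_neg h, ih]
        have : (d :: t).count c = t.count c := by
          simp [Ne.symm h]
        rw [this]

-- A's outer fold returns (l1, concatenation over l1's chars of their s2-matches)
theorem pvA_fold (l2 : List Char) : ∀ (l1 : List Char) (a b : List Char),
    l1.foldl (fun (st : List Char × List Char) c =>
      (st.1 ++ [c], l2.foldl (fun acc d => if c = d then acc ++ [d] else acc) st.2)) (a, b)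
    = (a ++ l1, b ++ l1.flatMap (fun c => List.replicate (l2.count c) c)) := by
  intro l1
  induction l1 with
  | nil => intro a b; simp
  | cons c t ih =>
      intro a b
      rw [List.foldl_cons]
      show (t.foldl _ (a ++ [c], l2.foldl _ b)) = _
      rw [ih, pvInner]
      simp [List.flatMap_cons]

theorem pvLen_le_sum : ∀ (ns : List ℕ), (∀ x ∈ ns, 1 ≤ x) → ns.length ≤ ns.sum := by
  intro ns
  induction ns with
  | nil => simp
  | cons n t ih =>
      intro h
      have h1 := h n (by simp)
      have h2 := ih (fun x hx => h x (by simp [hx]))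
      simp only [List.length_cons, List.sum_cons]
      omega

theorem pvAll_one : ∀ (ns : List ℕ), ns.sum = ns.length → (∀ x ∈ ns, 1 ≤ x) → ∀ x ∈ ns, x = 1 := by
  intro ns
  induction ns with
  | nil => simp
  | cons n t ih =>
      intro hsum hpos x hx
      have h1 := hpos n (by simp)
      have h2 := pvLen_le_sum t (fun y hy => hpos y (by simp [hy]))
      simp only [List.sum_cons, List.length_cons] at hsum
      rcases List.mem_cons.mp hx with h | h
      · omega
      · exact ih (by omega) (fun y hy => hpos y (by simp [hy])) x h

-- the heart: A's string equality holds iff every character of l1 occurs exactly once in l2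
theorem pvKey (l1 l2 : List Char) :
    (l1 = l1.flatMap (fun c => List.replicate (l2.count c) c)) ↔ (∀ c ∈ l1, l2.count c = 1) := by
  constructor
  · intro h
    have hlen : l1.length = (l1.map (fun c => l2.count c)).sum := by
      conv_lhs => rw [h]
      simp [List.length_flatMap]
    have hpos : ∀ c ∈ l1, 1 ≤ l2.count c := by
      intro c hc
      have hm : c ∈ l1.flatMap (fun c => List.replicate (l2.count c) c) := by rw [← h]; exact hc
      rcases List.mem_flatMap.mp hm with ⟨d, _, hd⟩
      have hcd : c = d := List.eq_of_mem_replicate hd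
      subst hcd
      have hne : l2.count c ≠ 0 := by
        intro h0; rw [h0] at hd; simp at hd
      omega
    intro c hc
    have hall := pvAll_one (l1.map (fun c => l2.count c))
      (by rw [List.length_map]; omega)
      (by intro x hx; rcases List.mem_map.mp hx with ⟨d, hd, rfl⟩; exact hpos d hd)
    exact hall _ (List.mem_map.mpr ⟨c, hc, rfl⟩)
  · intro h
    induction l1 with
    | nil => simp
    | cons c t ih =>
        rw [List.flatMap_cons, h c (by simp), List.replicate_one, List.singleton_append]
        exact congrArg (List.cons c) (ih (fun d hd => h d (by simp [hd])))

-- ===== VERDICT (by name: the statement is the Claim_ definition above) =====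
theorem checkCharacter_spec : Claim_equal_checkCharacter := by
  intro s1 s2 _
  unfold Spec_checkCharacter checkCharacter checkCharacter_alt
  simp only [pvA_fold, List.nil_append]
  have hA : (if s1.toList = s1.toList.flatMap (fun c => List.replicate (s2.toList.count c) c)
        then true else false)
      = decide (s1.toList = s1.toList.flatMap (fun c => List.replicate (s2.toList.count c) c)) := by
    by_cases h : s1.toList = s1.toList.flatMap (fun c => List.replicate (s2.toList.count c) c)
    · rw [if_pos h, decide_eq_true h]
    · rw [if_neg h, decide_eq_false h]
  rw [hA, Bool.eq_iff_iff]
  simp only [decide_eq_true_eq, List.all_eq_true, PySem.Dict.getD_foldl_insert_add_one,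
    PySem.Dict.getD_empty, beq_iff_eq]
  rw [pvKey]
  constructor
  · intro h c hc; have := h c hc; omega
  · intro h c hc; have := h c hc; omega
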